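-- pv_equiv track=rewrite | github.com/Yangsy56302/Git | bmp/obj.py | calc_count
-- ===== SOURCE A (Python) =====
-- def calc_count(negnum_dict: dict[int, int], negated_number: int = 0) -> int:
--     if len(negnum_dict) == 0:
--         return 0
--     if len(negnum_dict) == 1:
--         return int(list(negnum_dict.keys())[0] == negated_number)
--     negnum_list = []
--     for neg, num in negnum_dict.items():
--         negnum_list.extend([neg] * num)
--     negnum_list.sort(reverse=True)
--     current_negnum = negnum_list[0]
--     current_count = 0
--     for n in negnum_list:
--         if n < negated_number:
--             break
--         elif n == current_negnum:
--             current_count += 1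
--         elif current_negnum - n == 1:
--             current_count = min(0, -current_count) + 1
--             current_negnum = n
--         else:
--             current_count = 1
--             current_negnum = n
--     return max(0, current_count) if current_negnum == negated_number else 0
-- ===== SOURCE B (Python) =====
-- def calc_count(negnum_dict: dict[int, int], negated_number: int = 0) -> int:
--     if len(negnum_dict) == 0:
--         return 0
--     if len(negnum_dict) == 1:
--         return int(next(iter(negnum_dict)) == negated_number)
--     groups = sorted(((k, m) for k, m in negnum_dict.items() if m > 0),
--                     key=lambda p: p[0], reverse=True)
--     cur = None
--     cnt = 0
--     for k, m in groups:
--         if k < negated_number: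
--             break
--         if cur is None or cur - k > 1:
--             cur, cnt = k, m
--         else:
--             cur, cnt = k, m - max(0, cnt)
--     return max(0, cnt) if cur == negated_number else 0
-- ===== Notes on version B (the rewrite author's own statement) =====
-- stated objective: alternative
-- what changed: Instead of expanding every (key,count) pair into count copies, sorting the whole multiset and scanning it element by element, B sorts only the positive (key,count) pairs descending by key and applies one arithmetic state transition per pair, folding each whole count at once.
-- crash fix: On dicts with at least two keys whose counts are all <= 0 the expanded multiset is empty and A raises IndexError on its first element; B returns 0. — e.g. on calc_count([(0, 0), (1, -1)], 0): A raises IndexError, B returns 0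
import Mathlib
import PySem

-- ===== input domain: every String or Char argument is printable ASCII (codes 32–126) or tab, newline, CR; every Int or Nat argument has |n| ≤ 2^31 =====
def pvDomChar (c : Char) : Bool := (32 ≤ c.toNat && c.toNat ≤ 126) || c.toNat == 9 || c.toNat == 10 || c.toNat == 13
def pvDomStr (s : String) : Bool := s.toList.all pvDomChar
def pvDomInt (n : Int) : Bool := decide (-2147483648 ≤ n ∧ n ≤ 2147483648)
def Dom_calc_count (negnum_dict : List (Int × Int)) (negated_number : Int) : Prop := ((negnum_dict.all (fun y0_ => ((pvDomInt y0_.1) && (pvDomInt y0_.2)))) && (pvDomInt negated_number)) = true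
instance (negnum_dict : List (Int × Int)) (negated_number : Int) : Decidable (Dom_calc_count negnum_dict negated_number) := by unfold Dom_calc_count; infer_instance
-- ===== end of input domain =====

-- B never expands counts into a multiset: it sorts the positive (key, count) pairs descending by key
-- and folds each pair once with an arithmetic state transition (an alternative algorithm, same observable result).

-- ===== PORT A =====
-- the scan over the descending multiset: state (current_negnum, current_count); 'break' returns the state
def pvALoop (neg : Int) : List Int → Int → Int → Int × Int
  | [], cur, cnt => (cur, cnt)
  | n :: rest, cur, cnt =>
    if n < neg then (cur, cnt)
    else if n = cur then pvALoop neg rest cur (cnt + 1)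
    else if cur - n = 1 then pvALoop neg rest n (min 0 (-cnt) + 1)
    else pvALoop neg rest n 1

def calc_count (negnum_dict : List (Int × Int)) (negated_number : Int) : Int :=
  let d := PySem.Dict.ofList negnum_dict
  if d.size = 0 then 0
  else if d.size = 1 then
    match PySem.List.pyGet? d.keys 0 with
    | some k => if k = negated_number then 1 else 0
    | none => 0   -- unreachable: size = 1
  else
    let negnum_list := d.items.foldl (fun acc p => acc ++ List.replicate p.2.toNat p.1) []
    let sortedl := PySem.List.sorted negnum_list (fun x => x) true
    match PySem.List.pyGet? sortedl 0 with
    | none => 0   -- IndexError in Python (all counts ≤ 0): excluded by Pre_calc_count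
    | some h0 =>
      let st := pvALoop negated_number sortedl h0 0
      if st.1 = negated_number then max 0 st.2 else 0

-- ===== PORT B =====
-- one transition per (key, count) group; cur = None until the first kept group
def pvBLoop (neg : Int) : List (Int × Int) → Option Int → Int → Option Int × Int
  | [], cur, cnt => (cur, cnt)
  | (k, m) :: rest, cur, cnt =>
    if k < neg then (cur, cnt)
    else
      match cur with
      | none => pvBLoop neg rest (some k) m
      | some c =>
        if 1 < c - k then pvBLoop neg rest (some k) m
        else pvBLoop neg rest (some k) (m - max 0 cnt)

def calc_count_alt (negnum_dict : List (Int × Int)) (negated_number : Int) : Int :=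
  let d := PySem.Dict.ofList negnum_dict
  if d.size = 0 then 0
  else if d.size = 1 then
    match d.keys.head? with
    | some k => if k = negated_number then 1 else 0
    | none => 0   -- unreachable: size = 1
  else
    let groups := PySem.List.sorted (d.items.filter (fun p => 0 < p.2)) (fun p => p.1) true
    let st := pvBLoop negated_number groups none 0
    match st.1 with
    | some c => if c = negated_number then max 0 st.2 else 0
    | none => 0

-- ===== PRECONDITION & SPEC =====
-- Pre_ excludes exactly the inputs on which A raises IndexError: two or more distinct keys, all counts ≤ 0
-- (the expanded multiset is empty and A indexes its first element).
def Pre_calc_count (negnum_dict : List (Int × Int)) (negated_number : Int) : Prop :=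
  (PySem.Dict.ofList negnum_dict).size ≤ 1 ∨ ∃ p ∈ (PySem.Dict.ofList negnum_dict).items, 0 < p.2
instance (negnum_dict : List (Int × Int)) (negated_number : Int) : Decidable (Pre_calc_count negnum_dict negated_number) := by unfold Pre_calc_count; infer_instance

def pvWitness_calc_count : (List (Int × Int)) × Int := ([(3, 2), (2, 1)], 2)

-- A raises IndexError when the dict has at least two keys and every count is ≤ 0; B returns 0 there.
def Raises_calc_count (negnum_dict : List (Int × Int)) (negated_number : Int) : Prop :=
  2 ≤ (PySem.Dict.ofList negnum_dict).size ∧ ∀ p ∈ (PySem.Dict.ofList negnum_dict).items, p.2 ≤ 0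
instance (negnum_dict : List (Int × Int)) (negated_number : Int) : Decidable (Raises_calc_count negnum_dict negated_number) := by unfold Raises_calc_count; infer_instance

def pvRaiseWitness_calc_count : (List (Int × Int)) × Int := ([(0, 0), (1, -1)], 0)
def pvRaiseWitnessOut_calc_count : Int := 0

def Spec_calc_count (negnum_dict : List (Int × Int)) (negated_number : Int) (out : Int) : Prop := out = calc_count_alt negnum_dict negated_number
instance (negnum_dict : List (Int × Int)) (negated_number : Int) (out : Int) : Decidable (Spec_calc_count negnum_dict negated_number out) := by unfold Spec_calc_count; infer_instance

-- ===== CLAIM (what is proved, stated in full; the proofs are below) =====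
def Claim_equal_calc_count : Prop := ∀ (negnum_dict : List (Int × Int)) (negated_number : Int), Dom_calc_count negnum_dict negated_number → Pre_calc_count negnum_dict negated_number → Spec_calc_count negnum_dict negated_number (calc_count negnum_dict negated_number)

def Claim_raises_calc_count : Prop := (∀ (negnum_dict : List (Int × Int)) (negated_number : Int), Dom_calc_count negnum_dict negated_number → Raises_calc_count negnum_dict negated_number → ¬ Pre_calc_count negnum_dict negated_number) ∧ (Dom_calc_count (pvRaiseWitness_calc_count.1) (pvRaiseWitness_calc_count.2) ∧ Raises_calc_count (pvRaiseWitness_calc_count.1) (pvRaiseWitness_calc_count.2) ∧ calc_count_alt (pvRaiseWitness_calc_count.1) (pvRaiseWitness_calc_count.2) = pvRaiseWitnessOut_calc_count)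

-- ===== LEMMAS AND PROOFS =====

-- the expansion function: a (key, count) pair contributes count copies of its key
def pvRep (p : Int × Int) : List Int := List.replicate p.2.toNat p.1

-- entries with count ≤ 0 contribute nothing to the expanded multiset
lemma pvFlatMap_filter (l : List (Int × Int)) :
    l.flatMap pvRep = (l.filter (fun p => 0 < p.2)).flatMap pvRep := by
  induction l with
  | nil => rfl
  | cons p l ih =>
    by_cases hp : 0 < p.2
    · simp [List.flatMap_cons, hp, ih]
    · have : pvRep p = [] := by
        simp [pvRep, List.replicate_eq_nil_iff]
        omega
      simp [List.flatMap_cons, hp, this, ih]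

-- the expansion of a strictly key-decreasing group list is a weakly decreasing multiset
lemma pvPairwise_flatMap (ps : List (Int × Int))
    (h : ps.Pairwise (fun p q => q.1 < p.1)) :
    (ps.flatMap pvRep).Pairwise (fun a b : Int => b ≤ a) := by
  induction ps with
  | nil => simp
  | cons p ps ih =>
    rw [List.flatMap_cons, List.pairwise_append]
    refine ⟨?_, ih h.tail, ?_⟩
    · exact List.pairwise_replicate.mpr (Or.inr le_rfl)
    · intro a ha b hb
      have ha' : a = p.1 := List.eq_of_mem_replicate ha
      obtain ⟨q, hq, hbq⟩ := List.mem_flatMap.mp hb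
      have hb' : b = q.1 := List.eq_of_mem_replicate hbq
      have := (List.pairwise_cons.mp h).1 q hq
      omega

-- A's loop consumes a run of copies of the current value by adding their number to the count
lemma pvALoop_run (neg : Int) (j : Nat) (rest : List Int) (cur cnt : Int)
    (h : ¬ cur < neg) :
    pvALoop neg (List.replicate j cur ++ rest) cur cnt = pvALoop neg rest cur (cnt + j) := by
  induction j generalizing cnt with
  | zero => simp
  | succ j ih =>
    rw [List.replicate_succ, List.cons_append]
    simp only [pvALoop, if_neg h]
    rw [ih]
    push_cast
    ring_nf

-- main invariant: after the first group the two loops carry the same state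
lemma pvLoop_agree (neg : Int) (ps : List (Int × Int)) :
    ∀ (cur cnt : Int), ps.Pairwise (fun p q => q.1 < p.1) →
    (∀ p ∈ ps, 0 < p.2 ∧ p.1 < cur) →
    pvBLoop neg ps (some cur) cnt =
      (some (pvALoop neg (ps.flatMap pvRep) cur cnt).1,
       (pvALoop neg (ps.flatMap pvRep) cur cnt).2) := by
  induction ps with
  | nil => intro cur cnt _ _; simp [pvALoop, pvBLoop]
  | cons p ps ih =>
    intro cur cnt hpw hmem
    obtain ⟨k, m⟩ := p
    obtain ⟨hm, hk⟩ := hmem (k, m) (List.mem_cons_self)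
    simp only at hm hk
    have hrep : pvRep (k, m) = k :: List.replicate (m.toNat - 1) k := by
      simp only [pvRep]
      conv_lhs => rw [show m.toNat = (m.toNat - 1) + 1 from by omega]
      rw [List.replicate_succ]
    have hcast : ((m.toNat - 1 : Nat) : Int) = m - 1 := by omega
    have htail : ∀ q ∈ ps, 0 < q.2 ∧ q.1 < k := by
      intro q hq
      exact ⟨(hmem q (List.mem_cons_of_mem _ hq)).1, (List.pairwise_cons.mp hpw).1 q hq⟩
    by_cases hbr : k < neg
    · -- both loops stop at the first element below the threshold
      rw [List.flatMap_cons, hrep]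
      simp [pvALoop, pvBLoop, hbr]
    · rw [List.flatMap_cons, hrep, List.cons_append]
      have hne : k ≠ cur := by omega
      simp only [pvBLoop, pvALoop, if_neg hbr, if_neg hne]
      by_cases hstep : cur - k = 1
      · have h1 : ¬ 1 < cur - k := by omega
        rw [if_neg h1, if_pos hstep, pvALoop_run neg _ _ _ _ hbr,
          show min 0 (-cnt) + 1 + ((m.toNat - 1 : Nat) : Int) = m - max 0 cnt from by omega,
          ih k _ hpw.tail htail]
      · have h1 : 1 < cur - k := by omega
        rw [if_pos h1, if_neg hstep, pvALoop_run neg _ _ _ _ hbr,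
          show (1 : Int) + ((m.toNat - 1 : Nat) : Int) = m from by omega,
          ih k _ hpw.tail htail]

-- the keys of the kept, descending-sorted groups are strictly decreasing
lemma pvGroups_pairwise (nd : List (Int × Int)) :
    (PySem.List.sorted ((PySem.Dict.ofList nd).items.filter (fun p => 0 < p.2)) (fun p => p.1) true).Pairwise
      (fun p q => q.1 < p.1) := by
  set d := PySem.Dict.ofList nd with hd
  set ps := PySem.List.sorted (d.items.filter (fun p => 0 < p.2)) (fun p => p.1) true with hps
  have hle : ps.Pairwise (fun p q => q.1 ≤ p.1) := PySem.List.sorted_pairwise_rev _ _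
  have hnd : (ps.map (fun p => p.1)).Nodup := by
    have h1 : (d.items.map (fun p => p.1)).Nodup := PySem.Dict.nodup_keys_ofList nd
    have h2 : ((d.items.filter (fun p => 0 < p.2)).map (fun p => p.1)).Sublist (d.items.map (fun p => p.1)) :=
      List.Sublist.map _ List.filter_sublist
    have h3 : ((d.items.filter (fun p => 0 < p.2)).map (fun p => p.1)).Nodup := h1.sublist h2
    have h4 : (ps.map (fun p => p.1)).Perm ((d.items.filter (fun p => 0 < p.2)).map (fun p => p.1)) :=
      (PySem.List.sorted_perm _ _ _).map _
    exact h3.perm h4.symm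
  have hne : ps.Pairwise (fun p q => p.1 ≠ q.1) := List.pairwise_map.mp hnd
  exact (hle.and hne).imp (by intro p q h; omega)

-- A's sorted expanded multiset is exactly the expansion of B's sorted group list
lemma pvSorted_eq_flatMap (nd : List (Int × Int)) :
    PySem.List.sorted ((PySem.Dict.ofList nd).items.flatMap pvRep) (fun x => x) true =
      (PySem.List.sorted ((PySem.Dict.ofList nd).items.filter (fun p => 0 < p.2)) (fun p => p.1) true).flatMap pvRep := by
  set d := PySem.Dict.ofList nd with hd
  set ps := PySem.List.sorted (d.items.filter (fun p => 0 < p.2)) (fun p => p.1) true with hps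
  apply PySem.List.eq_of_perm_of_pairwise_le_of_injective (fun x : Int => -x) neg_injective
  · have hperm1 : (PySem.List.sorted (d.items.flatMap pvRep) (fun x => x) true).Perm (d.items.flatMap pvRep) :=
      PySem.List.sorted_perm _ _ _
    have hperm2 : (d.items.flatMap pvRep).Perm (ps.flatMap pvRep) := by
      rw [pvFlatMap_filter]
      exact ((PySem.List.sorted_perm _ _ _).flatMap (fun _ _ => List.Perm.refl _)).symm
    exact hperm1.trans hperm2
  · have := PySem.List.sorted_pairwise_rev (d.items.flatMap pvRep) (fun x : Int => x)
    exact this.imp (by intro a b h; simpa using h)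
  · exact (pvPairwise_flatMap ps (pvGroups_pairwise nd)).imp (by intro a b h; simpa using h)

-- Python's xs[0] on a nonempty list is its head
lemma pvPyGet0 {α : Type} (x : α) (l : List α) : PySem.List.pyGet? (x :: l) 0 = some x := by
  simp [PySem.List.pyGet?, PySem.List.pyIdx?]

-- every kept group has a positive count
lemma pvGroups_pos (nd : List (Int × Int)) (p : Int × Int)
    (hp : p ∈ PySem.List.sorted ((PySem.Dict.ofList nd).items.filter (fun q => 0 < q.2)) (fun q => q.1) true) :
    0 < p.2 := by
  have h1 := (PySem.List.mem_sorted _ _ _ _).mp hp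
  have := List.of_mem_filter h1
  simpa using this

-- ===== VERDICT (by name: the statement is the Claim_ definition above) =====
theorem calc_count_spec : Claim_equal_calc_count := by
  intro nd neg _ hpre
  unfold Spec_calc_count calc_count calc_count_alt
  unfold Pre_calc_count at hpre
  dsimp only
  set d := PySem.Dict.ofList nd with hd
  by_cases h0 : d.size = 0
  · simp [h0]
  by_cases h1 : d.size = 1
  · -- one key: both read the first (only) key
    have hkl : d.keys.length = 1 := by
      simpa [PySem.Dict.keys, PySem.Dict.size] using h1
    obtain ⟨k, hk⟩ := List.length_eq_one_iff.mp hkl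
    simp [h1, hk, PySem.List.pyGet?, PySem.List.pyIdx?]
  · -- general path
    simp only [if_neg h0, if_neg h1]
    rw [PySem.List.foldl_append_eq_flatMap, List.nil_append,
      show (fun p : Int × Int => List.replicate p.2.toNat p.1) = pvRep from rfl]
    set ps := PySem.List.sorted (d.items.filter (fun p => 0 < p.2)) (fun p => p.1) true with hps
    have hsort := pvSorted_eq_flatMap nd
    rw [← hd] at hsort
    rw [← hps] at hsort
    rw [hsort]
    have hpsne : ps ≠ [] := by
      rcases hpre with hpre | ⟨p, hpm, hpp⟩
      · omega
      · rw [hps, Ne, PySem.List.sorted_eq_nil_iff]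
        intro hfil
        have : p ∈ d.items.filter (fun q => 0 < q.2) := List.mem_filter.mpr ⟨hpm, by simpa using hpp⟩
        rw [hfil] at this
        exact absurd this (List.not_mem_nil)
    obtain ⟨⟨k0, m0⟩, ps', hps'⟩ := List.exists_cons_of_ne_nil hpsne
    have hm0 : 0 < m0 := pvGroups_pos nd (k0, m0) (by rw [← hd, ← hps, hps']; exact List.mem_cons_self)
    have hpw := pvGroups_pairwise nd
    rw [← hd, ← hps] at hpw
    rw [hps'] at hpw ⊢
    have hrep : pvRep (k0, m0) = k0 :: List.replicate (m0.toNat - 1) k0 := by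
      simp only [pvRep]
      conv_lhs => rw [show m0.toNat = (m0.toNat - 1) + 1 from by omega]
      rw [List.replicate_succ]
    rw [List.flatMap_cons, hrep, List.cons_append, pvPyGet0]
    dsimp only
    by_cases hbr : k0 < neg
    · -- first group already below the threshold: A breaks with count 0, B keeps cur = None
      have hA : pvALoop neg (k0 :: (List.replicate (m0.toNat - 1) k0 ++ List.flatMap pvRep ps')) k0 0 = (k0, 0) := by
        simp only [pvALoop, if_pos hbr]
      have hB : pvBLoop neg ((k0, m0) :: ps') none 0 = (none, 0) := by
        simp only [pvBLoop, if_pos hbr]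
      rw [hA, hB]
      simp [show k0 ≠ neg from by omega]
    · -- A consumes the first group; afterwards the two loops stay in lock-step
      have hA : pvALoop neg (k0 :: (List.replicate (m0.toNat - 1) k0 ++ List.flatMap pvRep ps')) k0 0 =
          pvALoop neg (List.flatMap pvRep ps') k0 m0 := by
        simp only [pvALoop, if_neg hbr]
        rw [pvALoop_run neg _ _ _ _ hbr,
          show (0 : Int) + 1 + ((m0.toNat - 1 : Nat) : Int) = m0 from by omega]
        simp
      have hB : pvBLoop neg ((k0, m0) :: ps') none 0 = pvBLoop neg ps' (some k0) m0 := by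
        simp only [pvBLoop, if_neg hbr]
      have htail : ∀ q ∈ ps', 0 < q.2 ∧ q.1 < k0 := by
        intro q hq
        refine ⟨pvGroups_pos nd q ?_, (List.pairwise_cons.mp hpw).1 q hq⟩
        rw [← hd, ← hps, hps']
        exact List.mem_cons_of_mem _ hq
      rw [hA, hB, pvLoop_agree neg ps' k0 m0 hpw.tail htail]

def calc_count_raises : Claim_raises_calc_count := by
  unfold Claim_raises_calc_count
  constructor
  · intro nd neg _ ⟨hsz, hall⟩ hpre
    rcases hpre with h | ⟨p, hp, hpp⟩
    · omega
    · have := hall p hp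
      omega
  · exact ⟨by decide, by decide, by decide⟩
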